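-- pv_equiv track=rewrite | github.com/williandres/AiRoute | python/oop_algorithms/algorithms/practicas/LongestWord.py | LongestWord
-- ===== SOURCE A (Python) =====
-- def LongestWord(sen):
--     i=0
--     j=-1
--     ln=0
--     while i < len(sen):
--         simbol=ord(sen[i])
--         if simbol<48 or  57<simbol< 65 or  90<simbol< 97 or 122<simbol< 128:
--             if i-j>ln:
--                 ln=i-j
--                 long_word=sen[j+1:i]
--             j=i
--         i+=1
--     if len(sen)-j>ln:
--         long_word=sen[j+1:]
--     return long_word
-- ===== SOURCE B (Python) =====
-- def LongestWord(sen):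
--     # Replace every separator char (per A's code ranges) by a space, then
--     # split on spaces and take the first longest word.
--     def is_word(ch):
--         o = ord(ch)
--         return 48 <= o <= 57 or 65 <= o <= 90 or 97 <= o <= 122 or o >= 128
--     cleaned = ''.join(ch if is_word(ch) else ' ' for ch in sen)
--     best = ''
--     for w in cleaned.split():
--         if len(w) > len(best):
--             best = w
--     return best
-- ===== Notes on version B (the rewrite author's own statement) =====
-- stated objective: simpler
-- what changed: A's single index loop with slice bookkeeping (last-separator index j, best length ln, slicing sen[j+1:i]) is replaced by: blank out every separator character, str.split() into words, then keep the first longest word.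
import Mathlib
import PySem

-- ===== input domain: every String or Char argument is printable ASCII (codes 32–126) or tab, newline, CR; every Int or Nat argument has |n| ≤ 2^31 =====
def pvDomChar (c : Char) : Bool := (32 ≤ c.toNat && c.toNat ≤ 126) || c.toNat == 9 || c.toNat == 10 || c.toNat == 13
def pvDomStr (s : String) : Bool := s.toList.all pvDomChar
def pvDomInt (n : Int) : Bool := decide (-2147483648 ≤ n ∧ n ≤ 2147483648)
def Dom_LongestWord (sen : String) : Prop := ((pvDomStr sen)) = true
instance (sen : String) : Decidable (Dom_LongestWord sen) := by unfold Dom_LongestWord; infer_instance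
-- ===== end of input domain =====

-- B replaces A's index/slice bookkeeping loop by: blank out separator chars, split on
-- whitespace, keep the first longest word (objective: simpler; same behaviour on Dom).

-- ===== PORT A =====
-- A's separator test: simbol<48 or 57<simbol<65 or 90<simbol<97 or 122<simbol<128
def LongestWordSep (n : Nat) : Bool :=
  decide (n < 48) || (decide (57 < n) && decide (n < 65)) ||
  (decide (90 < n) && decide (n < 97)) || (decide (122 < n) && decide (n < 128))

-- A's while-loop, state (i, j, ln, long_word); long_word unassigned = none
def LongestWordLoop (s : List Char) (i : Nat) (j ln : Int) (lw : Option (List Char)) :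
    Int × Int × Option (List Char) :=
  if h : i < s.length then
    let simbol := (s[i]).toNat
    if LongestWordSep simbol then
      if (i : Int) - j > ln then
        LongestWordLoop s (i + 1) (i : Int) ((i : Int) - j)
          (some (PySem.List.slice s (some (j + 1)) (some (i : Int))))
      else LongestWordLoop s (i + 1) (i : Int) ln lw
    else LongestWordLoop s (i + 1) j ln lw
  else (j, ln, lw)
termination_by s.length - i

-- A's final 'if len(sen)-j>ln: long_word=sen[j+1:]' and return (getD [] is unreachable)
def LongestWordFinish (s : List Char) (r : Int × Int × Option (List Char)) : List Char :=
  if (s.length : Int) - r.1 > r.2.1 then PySem.List.slice s (some (r.1 + 1)) none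
  else r.2.2.getD []

def LongestWord (sen : String) : String :=
  let s := sen.toList
  String.ofList (LongestWordFinish s (LongestWordLoop s 0 (-1) 0 none))

-- ===== PORT B =====
def LongestWordIsWord (c : Char) : Bool :=
  (decide (48 ≤ c.toNat) && decide (c.toNat ≤ 57)) ||
  (decide (65 ≤ c.toNat) && decide (c.toNat ≤ 90)) ||
  (decide (97 ≤ c.toNat) && decide (c.toNat ≤ 122)) || decide (128 ≤ c.toNat)

-- 'ch if is_word(ch) else " "'
def LongestWordClean (c : Char) : Char := if LongestWordIsWord c then c else ' '

def LongestWord_alt (sen : String) : String :=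
  let cleaned := sen.toList.map LongestWordClean
  String.ofList ((PySem.Chars.split₀ cleaned).foldl
    (fun best w => if w.length > best.length then w else best) [])

-- ===== PRECONDITION & SPEC =====
def Spec_LongestWord (sen : String) (out : String) : Prop := out = LongestWord_alt sen
instance (sen : String) (out : String) : Decidable (Spec_LongestWord sen out) := by unfold Spec_LongestWord; infer_instance

-- ===== CLAIM (what is proved, stated in full; the proofs are below) =====
def Claim_equal_LongestWord : Prop := ∀ (sen : String), Dom_LongestWord sen → Spec_LongestWord sen (LongestWord sen)

-- ===== LEMMAS AND PROOFS =====

lemma isspace_clean (c : Char) (h : pvDomChar c = true) :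
    PySem.Chars.isspace (LongestWordClean c) = LongestWordSep c.toNat := by
  by_cases hw : LongestWordIsWord c = true
  · simp only [LongestWordClean, hw, if_pos]
    simp only [LongestWordIsWord, pvDomChar] at hw h
    simp only [PySem.Chars.isspace, LongestWordSep]
    simp only [Bool.or_eq_true, Bool.and_eq_true, decide_eq_true_eq, beq_iff_eq] at hw h
    rw [Bool.eq_iff_iff]
    simp only [Bool.or_eq_true, Bool.and_eq_true, decide_eq_true_eq]
    omega
  · have hcl : LongestWordClean c = ' ' := by simp [LongestWordClean, hw]
    rw [hcl]
    have h1 : PySem.Chars.isspace ' ' = true := by decide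
    have h2 : LongestWordSep c.toNat = true := by
      simp only [LongestWordIsWord, Bool.or_eq_true, Bool.and_eq_true, decide_eq_true_eq] at hw
      simp only [LongestWordSep, Bool.or_eq_true, Bool.and_eq_true, decide_eq_true_eq]
      omega
    rw [h1, h2]

lemma sep_eq_not_word (c : Char) : LongestWordSep c.toNat = !LongestWordIsWord c := by
  simp only [LongestWordSep, LongestWordIsWord]
  by_cases h1 : c.toNat < 48 <;> by_cases h2 : c.toNat ≤ 57 <;>
    by_cases h3 : c.toNat ≤ 90 <;> by_cases h4 : c.toNat < 65 <;>
    by_cases h5 : c.toNat ≤ 122 <;> by_cases h6 : c.toNat < 97 <;>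
    by_cases h7 : c.toNat < 128 <;> simp_all <;> omega

-- reference scan: cur = current run, best = best-so-far (first longest wins)
def LongestWordScan : List Char → List Char → List Char → List Char
  | [], cur, best => if cur.length > best.length then cur else best
  | c :: rest, cur, best =>
    if LongestWordSep c.toNat then
      LongestWordScan rest [] (if cur.length > best.length then cur else best)
    else LongestWordScan rest (cur ++ [c]) best

lemma go_append (t : List Char) : ∀ (cur : List Char) (accL : List (List Char)),
    PySem.Chars.split₀.go t cur accL = accL.reverse ++ PySem.Chars.split₀.go t cur [] := by
  induction t with
  | nil =>
    intro cur accL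
    simp only [PySem.Chars.split₀.go]
    split_ifs <;> simp
  | cons c rest ih =>
    intro cur accL
    simp only [PySem.Chars.split₀.go]
    split_ifs with h1 h2
    · exact ih [] accL
    · rw [ih [] (cur.reverse :: accL), ih [] [cur.reverse]]
      simp
    · exact ih (c :: cur) accL

lemma fold_go_eq_scan (s : List Char) :
    ∀ (rcur best : List Char), (∀ c ∈ s, pvDomChar c = true) →
      (PySem.Chars.split₀.go (s.map LongestWordClean) rcur []).foldl
          (fun best w => if w.length > best.length then w else best) best =
        LongestWordScan s rcur.reverse best := by
  induction s with
  | nil =>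
    intro rcur best _
    cases rcur with
    | nil => simp [PySem.Chars.split₀.go, LongestWordScan]
    | cons x xs => simp [PySem.Chars.split₀.go, LongestWordScan, List.foldl]
  | cons c rest ih =>
    intro rcur best hdom
    have hd := hdom c (List.mem_cons_self)
    have hrest : ∀ x ∈ rest, pvDomChar x = true := fun x hx => hdom x (List.mem_cons_of_mem _ hx)
    simp only [List.map_cons, PySem.Chars.split₀.go, isspace_clean c hd]
    by_cases hs : LongestWordSep c.toNat
    · simp only [hs, if_pos, LongestWordScan]
      by_cases h1 : rcur.isEmpty
      · rw [if_pos h1]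
        simp only [List.isEmpty_iff] at h1
        subst h1
        rw [ih [] best hrest]
        norm_num
      · rw [if_neg h1, go_append, List.foldl_append]
        simp only [List.reverse_cons, List.reverse_nil, List.nil_append, List.foldl_cons,
          List.foldl_nil, List.length_reverse]
        rw [ih [] _ hrest]
        simp only [List.reverse_nil]
    · simp only [hs, Bool.false_eq_true, if_false, LongestWordScan]
      have hw : LongestWordIsWord c = true := by
        have h := sep_eq_not_word c
        rw [h] at hs
        simpa using hs
      rw [show LongestWordClean c = c from by simp [LongestWordClean, hw]]
      rw [ih (c :: rcur) best hrest]
      simp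

lemma loop_eq_scan (s : List Char) :
    ∀ (n i k : Nat) (ln : Int) (st : Option (List Char)),
      s.length - i = n → k ≤ i → i ≤ s.length →
      ((st = none ∧ ln = 0 ∧ k = 0) ∨ (∃ b, st = some b ∧ ln = (b.length : Int) + 1)) →
      LongestWordFinish s (LongestWordLoop s i ((k : Int) - 1) ln st) =
        LongestWordScan (s.drop i) ((s.drop k).take (i - k)) (st.getD []) := by
  intro n
  induction n with
  | zero =>
    intro i k ln st hn hki hil hinv
    have hi : i = s.length := by omega
    subst hi
    rw [LongestWordLoop, dif_neg (by omega)]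
    rw [List.drop_length, List.take_of_length_le (by simp [List.length_drop])]
    rcases hinv with ⟨hst, hln, hk⟩ | ⟨b, hst, hln⟩
    · subst hst hln hk
      simp only [LongestWordFinish, Option.getD_none, LongestWordScan, List.drop_zero]
      rw [if_pos (by omega)]
      rw [show (((0:Nat):Int) - 1 + 1) = (0:Int) from by ring, PySem.List.slice_from s (by omega)]
      cases s <;> simp
    · subst hst hln
      simp only [LongestWordFinish, Option.getD_some, LongestWordScan]
      by_cases hc : (s.drop k).length > b.length
      · rw [if_pos (by simp only [List.length_drop] at hc ⊢; omega), if_pos hc]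
        rw [show ((k:Int) - 1 + 1) = (k:Int) from by ring, PySem.List.slice_from s (by omega)]
        simp
      · rw [if_neg (by simp only [List.length_drop] at hc ⊢; omega), if_neg hc]
  | succ m ih =>
    intro i k ln st hn hki hil hinv
    have hi : i < s.length := by omega
    rw [LongestWordLoop, dif_pos hi]
    have hdropi : s.drop i = s[i] :: s.drop (i + 1) := List.drop_eq_getElem_cons hi
    by_cases hsep : LongestWordSep (s[i]).toNat
    · simp only [hsep, if_pos]
      have hcurlen : ((s.drop k).take (i - k)).length = i - k := by
        simp [List.length_take, List.length_drop]; omega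
      by_cases hcmp : (i : Int) - ((k : Int) - 1) > ln
      · rw [if_pos hcmp]
        have hslice : PySem.List.slice s (some ((k : Int) - 1 + 1)) (some (i : Int)) =
            (s.drop k).take (i - k) := by
          rw [show ((k:Int) - 1 + 1) = ((k:Nat):Int) from by ring]
          exact PySem.List.slice_natCast s k i
        rw [hslice]
        have hm : s.length - (i + 1) = m := by clear ih hinv; omega
        have hil2 : i + 1 ≤ s.length := by clear ih hinv; omega
        have hlnval : (i : Int) - ((k : Int) - 1) = (((s.drop k).take (i - k)).length : Int) + 1 := by
          rw [hcurlen]; omega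
        have h2 := ih (i + 1) (i + 1) ((i : Int) - ((k : Int) - 1)) (some ((s.drop k).take (i - k)))
          hm (le_refl _) hil2
          (Or.inr ⟨(s.drop k).take (i - k), rfl, hlnval⟩)
        rw [show (((i+1 : Nat):Int) - 1) = ((i:Int)) from by simp] at h2
        rw [h2]
        rw [hdropi]
        simp only [LongestWordScan, hsep, if_pos, Nat.sub_self, List.take_zero, Option.getD_some]
        congr 1
        rcases hinv with ⟨hst, hln, hk⟩ | ⟨b, hst, hln⟩
        · subst hst hln hk
          simp only [Option.getD_none]
          cases (s.drop 0).take (i - 0) <;> simp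
        · subst hst hln
          simp only [Option.getD_some]
          rw [if_pos (by omega)]
      · rw [if_neg hcmp]
        rcases hinv with ⟨hst, hln, hk⟩ | ⟨b, hst, hln⟩
        · exfalso; subst hln hk; push_cast at hcmp; omega
        · subst hst hln
          have hm : s.length - (i + 1) = m := by clear ih; omega
          have hil2 : i + 1 ≤ s.length := by clear ih; omega
          have h2 := ih (i + 1) (i + 1) ((b.length : Int) + 1) (some b)
            hm (le_refl _) hil2 (Or.inr ⟨b, rfl, rfl⟩)
          rw [show (((i+1 : Nat):Int) - 1) = ((i:Int)) from by simp] at h2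
          rw [h2]
          rw [hdropi]
          simp only [LongestWordScan, hsep, if_pos, Nat.sub_self, List.take_zero, Option.getD_some]
          congr 1
          rw [if_neg (by omega)]
    · simp only [hsep, Bool.false_eq_true, if_false]
      have hm : s.length - (i + 1) = m := by clear ih hinv; omega
      have hil2 : i + 1 ≤ s.length := by clear ih hinv; omega
      have hki2 : k ≤ i + 1 := by clear ih hinv; omega
      have h2 := ih (i + 1) k ln st hm hki2 hil2 hinv
      rw [h2]
      rw [hdropi]
      simp only [LongestWordScan, hsep, Bool.false_eq_true, if_false]
      congr 1
      rw [show i + 1 - k = (i - k) + 1 from by omega, List.take_add_one]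
      congr 1
      rw [List.getElem?_drop]
      rw [show k + (i - k) = i from by omega]
      simp [hi]

-- ===== VERDICT (by name: the statement is the Claim_ definition above) =====
theorem LongestWord_spec : Claim_equal_LongestWord := by
  intro sen hdom
  have hA := loop_eq_scan sen.toList sen.toList.length 0 0 0 none rfl (le_refl 0) (Nat.zero_le _) (Or.inl ⟨rfl, rfl, rfl⟩)
  have hB := fold_go_eq_scan sen.toList [] [] (by
    intro c hc
    have := (List.all_eq_true.mp hdom) c hc
    simpa using this)
  norm_num at hA
  simp only [Spec_LongestWord, LongestWord, LongestWord_alt, PySem.Chars.split₀]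
  rw [hA, hB]
  simp
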